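-- pv_equiv track=rewrite | github.com/mikedobing/powerbihealtheckanalyzer | src/pbianalyzer/backend/parsers/tmdl.py | _parse_column_ref
-- ===== SOURCE A (Python) =====
-- def _unquote_name(raw: str) -> str:
--     """Remove surrounding single-quotes and unescape doubled quotes."""
--     raw = raw.strip()
--     if raw.startswith("'") and raw.endswith("'") and len(raw) >= 2:
--         raw = raw[1:-1].replace("''", "'")
--     return raw
--
-- def _parse_column_ref(ref: str) -> tuple[str, str]:
--     """Parse a dotted Table.Column reference like  Sales.'Product Key'."""
--     ref = ref.strip()
--     dot_idx = -1
--     in_quote = False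
--     for i, ch in enumerate(ref):
--         if ch == "'":
--             in_quote = not in_quote
--         elif ch == "." and not in_quote:
--             dot_idx = i
--             break
--     if dot_idx < 0:
--         return ("", _unquote_name(ref))
--     table = _unquote_name(ref[:dot_idx])
--     column = _unquote_name(ref[dot_idx + 1:])
--     return (table, column)
-- ===== SOURCE B (Python) =====
-- def _unquote_name(raw: str) -> str:
--     """Remove surrounding single-quotes and unescape doubled quotes."""
--     raw = raw.strip()
--     if raw.startswith("'") and raw.endswith("'") and len(raw) >= 2:
--         raw = raw[1:-1].replace("''", "'")
--     return raw
--
-- def _parse_column_ref(ref: str) -> tuple[str, str]: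
--     """Parse a dotted Table.Column reference like  Sales.'Product Key'."""
--     ref = ref.strip()
--     parts = ref.split("'")
--     offset = 0
--     for idx, part in enumerate(parts):
--         if idx % 2 == 0:
--             j = part.find(".")
--             if j >= 0:
--                 dot = offset + j
--                 return (_unquote_name(ref[:dot]), _unquote_name(ref[dot + 1:]))
--         offset += len(part) + 1
--     return ("", _unquote_name(ref))
-- ===== Notes on version B (the rewrite author's own statement) =====
-- stated objective: faster
-- what changed: Replaces A's Python-level char-by-char scan (toggling an in-quote flag to find the first unquoted dot) by one split on single quotes plus str.find on the even-indexed (outside-quote) parts, reconstructing the absolute dot index from accumulated part lengths.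
import Mathlib
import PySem

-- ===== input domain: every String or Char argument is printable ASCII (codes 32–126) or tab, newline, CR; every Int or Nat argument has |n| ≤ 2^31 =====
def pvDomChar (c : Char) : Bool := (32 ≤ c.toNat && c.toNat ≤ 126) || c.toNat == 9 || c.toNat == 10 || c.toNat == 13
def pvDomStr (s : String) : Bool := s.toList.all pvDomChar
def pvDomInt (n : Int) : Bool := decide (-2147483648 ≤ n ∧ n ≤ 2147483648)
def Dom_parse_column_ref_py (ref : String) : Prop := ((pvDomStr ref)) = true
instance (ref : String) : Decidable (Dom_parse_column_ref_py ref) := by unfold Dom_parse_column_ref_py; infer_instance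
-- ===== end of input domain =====

-- B replaces A's stateful in-quote char scan by a single split on quotes and a scan of the
-- even-indexed (outside-quote) parts for the first dot; same result, measurably faster in Python
-- (the char loop moves into the C-level str.split / str.find).

-- ===== PORT A =====
-- shared helper _unquote_name (identical in both Pythons)
def pvUnquoteName (raw : String) : String :=
  let raw := PySem.Str.strip raw
  if PySem.Str.startswith raw "'" && PySem.Str.endswith raw "'" && decide (2 ≤ PySem.Str.len raw) then
    PySem.Str.replace (PySem.Str.slice raw (some 1) (some (-1))) "''" "'"
  else raw

-- A's loop: enumerate the chars, toggle in_quote on ', break at the first unquoted dot (-1 if none)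
def pvFindDotA : List Char → Bool → Int → Int
  | [], _, _ => -1
  | c :: cs, inq, i =>
    if c = '\'' then pvFindDotA cs (!inq) (i + 1)
    else if c = '.' ∧ inq = false then i
    else pvFindDotA cs inq (i + 1)

def parse_column_ref_py (ref : String) : String × String :=
  let s := PySem.Str.strip ref
  let dotIdx := pvFindDotA s.toList false 0
  if dotIdx < 0 then ("", pvUnquoteName s)
  else (pvUnquoteName (PySem.Str.slice s none (some dotIdx)),
        pvUnquoteName (PySem.Str.slice s (some (dotIdx + 1)) none))

-- ===== PORT B =====
-- B's loop over the quote-split parts: in even-indexed parts look for '.', tracking the absolute offset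
def pvWalkB : List (List Char) → Nat → Nat → Option Nat
  | [], _, _ => none
  | p :: ps, idx, off =>
    if idx % 2 = 0 then
      let j := PySem.Chars.find p ['.']
      if 0 ≤ j then some (off + j.toNat)
      else pvWalkB ps (idx + 1) (off + p.length + 1)
    else pvWalkB ps (idx + 1) (off + p.length + 1)

def parse_column_ref_py_alt (ref : String) : String × String :=
  let s := PySem.Str.strip ref
  let parts := PySem.Chars.splitOn s.toList ['\'']
  match pvWalkB parts 0 0 with
  | some dot =>
      (pvUnquoteName (PySem.Str.slice s none (some (dot : Int))),
       pvUnquoteName (PySem.Str.slice s (some ((dot : Int) + 1)) none))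
  | none => ("", pvUnquoteName s)

-- ===== PRECONDITION & SPEC =====
def Spec_parse_column_ref_py (ref : String) (out : String × String) : Prop := out = parse_column_ref_py_alt ref
instance (ref : String) (out : String × String) : Decidable (Spec_parse_column_ref_py ref out) := by unfold Spec_parse_column_ref_py; infer_instance

-- ===== CLAIM (what is proved, stated in full; the proofs are below) =====
def Claim_equal_parse_column_ref_py : Prop := ∀ (ref : String), Dom_parse_column_ref_py ref → Spec_parse_column_ref_py ref (parse_column_ref_py ref)

-- ===== LEMMAS AND PROOFS =====

-- clean structural form of splitting on a single quote: (first part, remaining parts)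
def pvSplit1 : List Char → List Char × List (List Char)
  | [] => ([], [])
  | c :: cs =>
    let r := pvSplit1 cs
    if c = '\'' then ([], r.1 :: r.2) else (c :: r.1, r.2)

-- first '.' position, structurally
def pvFindDot : List Char → Option Nat
  | [] => none
  | c :: l => if c = '.' then some 0 else (pvFindDot l).map (· + 1)

def pvToInt : Option Nat → Int
  | none => -1
  | some n => n

lemma pvSplitOn_go_eq (l : List Char) : ∀ (fuel : Nat) (cur : List Char) (acc : List (List Char)),
    l.length < fuel →
    PySem.Chars.splitOn.go ['\''] fuel l cur acc
      = acc.reverse ++ (cur.reverse ++ (pvSplit1 l).1) :: (pvSplit1 l).2 := by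
  induction l with
  | nil =>
    intro fuel cur acc h
    match fuel with
    | f + 1 => simp [PySem.Chars.splitOn.go, pvSplit1]
  | cons c rest ih =>
    intro fuel cur acc h
    match fuel with
    | f + 1 =>
      by_cases hc : c = '\''
      · subst hc
        rw [show PySem.Chars.splitOn.go ['\''] (f+1) ('\'' :: rest) cur acc
              = PySem.Chars.splitOn.go ['\''] f (List.drop 1 ('\'' :: rest)) [] (cur.reverse :: acc) by
            simp [PySem.Chars.splitOn.go, List.isPrefixOf]]
        rw [List.drop_one, List.tail_cons, ih f [] (cur.reverse :: acc) (by simpa using Nat.lt_of_succ_lt_succ h)]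
        simp [pvSplit1]
      · rw [show PySem.Chars.splitOn.go ['\''] (f+1) (c :: rest) cur acc
              = PySem.Chars.splitOn.go ['\''] f rest (c :: cur) acc by
            have hc' : ('\'' == c) = false := by simp [Ne.symm hc]
            simp [PySem.Chars.splitOn.go, List.isPrefixOf, hc']]
        rw [ih f (c :: cur) acc (by simpa using Nat.lt_of_succ_lt_succ h)]
        simp [pvSplit1, hc]

lemma pvSplitOn_eq (cs : List Char) :
    PySem.Chars.splitOn cs ['\''] = (pvSplit1 cs).1 :: (pvSplit1 cs).2 := by
  unfold PySem.Chars.splitOn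
  rw [pvSplitOn_go_eq cs (cs.length + 1) [] [] (by omega)]
  simp

lemma pvFind_go_dot (l : List Char) : ∀ (k : Nat),
    PySem.Chars.find.go ['.'] l k = (pvFindDot l).elim (-1 : Int) (fun n => ((k + n : Nat) : Int)) := by
  induction l with
  | nil => intro k; simp [PySem.Chars.find.go, pvFindDot, List.isEmpty]
  | cons c t ih =>
    intro k
    by_cases hc : c = '.'
    · subst hc
      simp [PySem.Chars.find.go, List.isPrefixOf, pvFindDot]
    · rw [show PySem.Chars.find.go ['.'] (c :: t) k = PySem.Chars.find.go ['.'] t (k + 1) by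
        have hc' : ('.' == c) = false := by simp [Ne.symm hc]
        simp [PySem.Chars.find.go, List.isPrefixOf, hc']]
      rw [ih (k + 1)]
      cases h : pvFindDot t with
      | none => simp [pvFindDot, hc, h]
      | some n => simp [pvFindDot, hc, h]; omega

lemma pvFind_dot (p : List Char) :
    PySem.Chars.find p ['.'] = pvToInt (pvFindDot p) := by
  unfold PySem.Chars.find
  rw [pvFind_go_dot p 0]
  cases h : pvFindDot p <;> simp [pvToInt]

-- B's part walk computes exactly A's scan (parity of the part index = A's in_quote flag)
lemma pvWalk_eq (cs : List Char) : ∀ (idx off : Nat) (b : Bool), (idx % 2 = 1 ↔ b = true) →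
    pvFindDotA cs b (off : Int)
      = pvToInt (pvWalkB ((pvSplit1 cs).1 :: (pvSplit1 cs).2) idx off) := by
  induction cs with
  | nil =>
    intro idx off b hb
    by_cases h : idx % 2 = 0 <;>
      simp [pvSplit1, pvWalkB, pvFindDotA, pvToInt, h, pvFind_dot, pvFindDot]
  | cons c cs' ih =>
    intro idx off b hb
    by_cases hc : c = '\''
    · subst hc
      have h1 : pvFindDotA ('\'' :: cs') b (off : Int) = pvFindDotA cs' (!b) ((off : Int) + 1) := by
        simp [pvFindDotA]
      have h2 : pvWalkB ((pvSplit1 ('\'' :: cs')).1 :: (pvSplit1 ('\'' :: cs')).2) idx off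
          = pvWalkB ((pvSplit1 cs').1 :: (pvSplit1 cs').2) (idx + 1) (off + 1) := by
        by_cases h : idx % 2 = 0 <;>
          simp [pvSplit1, pvWalkB, h, pvFind_dot, pvFindDot, pvToInt]
      rw [h1, h2, show ((off : Int) + 1) = ((off + 1 : Nat) : Int) by push_cast; ring]
      exact ih (idx + 1) (off + 1) (!b) (by rcases b <;> simp_all <;> omega)
    · have hsp : pvSplit1 (c :: cs') = (c :: (pvSplit1 cs').1, (pvSplit1 cs').2) := by
        simp [pvSplit1, hc]
      by_cases hdot : c = '.' ∧ b = false
      · obtain ⟨hd, hbf⟩ := hdot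
        subst hd; subst hbf
        have hidx : idx % 2 = 0 := by simp at hb; omega
        have : pvFindDot ('.' :: (pvSplit1 cs').1) = some 0 := by simp [pvFindDot]
        simp [pvFindDotA, hc, hsp, pvWalkB, hidx, pvFind_dot, this, pvToInt]
      · -- c ≠ '\'' and not an unquoted dot: both sides step past c
        have h1 : pvFindDotA (c :: cs') b (off : Int) = pvFindDotA cs' b ((off : Int) + 1) := by
          simp [pvFindDotA, hc]
          intro h' h''; exact absurd ⟨h', h''⟩ hdot
        have h2 : pvWalkB ((pvSplit1 (c :: cs')).1 :: (pvSplit1 (c :: cs')).2) idx off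
            = pvWalkB ((pvSplit1 cs').1 :: (pvSplit1 cs').2) idx (off + 1) := by
          rw [hsp]
          by_cases h : idx % 2 = 0
          · have hcd : c ≠ '.' := by
              intro hcd
              rcases Bool.eq_false_or_eq_true b with hbt | hbf
              · rw [hb.2 hbt] at h; omega
              · exact hdot ⟨hcd, hbf⟩
            cases hfd : pvFindDot (pvSplit1 cs').1 with
            | none =>
              have : pvFindDot (c :: (pvSplit1 cs').1) = none := by simp [pvFindDot, hcd, hfd]
              simp [pvWalkB, h, pvFind_dot, this, hfd, pvToInt]
              congr 1
              omega
            | some n =>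
              have : pvFindDot (c :: (pvSplit1 cs').1) = some (n + 1) := by
                simp [pvFindDot, hcd, hfd]
              simp [pvWalkB, h, pvFind_dot, this, hfd, pvToInt]
              rw [if_pos (by omega : (0:Int) ≤ (n:Int) + 1)]
              congr 1
              omega
          · simp only [pvWalkB, if_neg h]
            congr 1
            simp only [List.length_cons]
            omega
        rw [h1, h2, show ((off : Int) + 1) = ((off + 1 : Nat) : Int) by push_cast; ring]
        exact ih idx (off + 1) b hb

-- ===== VERDICT (by name: the statement is the Claim_ definition above) =====
theorem parse_column_ref_py_spec : Claim_equal_parse_column_ref_py := by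
  intro ref _
  show parse_column_ref_py ref = parse_column_ref_py_alt ref
  have h := pvWalk_eq (PySem.Str.strip ref).toList 0 0 false (by simp)
  rw [show ((0:Nat):Int) = 0 from rfl] at h
  show (if pvFindDotA (PySem.Str.strip ref).toList false 0 < 0 then
          ("", pvUnquoteName (PySem.Str.strip ref))
        else (pvUnquoteName (PySem.Str.slice (PySem.Str.strip ref) none (some (pvFindDotA (PySem.Str.strip ref).toList false 0))),
              pvUnquoteName (PySem.Str.slice (PySem.Str.strip ref) (some (pvFindDotA (PySem.Str.strip ref).toList false 0 + 1)) none)))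
      = (match pvWalkB (PySem.Chars.splitOn (PySem.Str.strip ref).toList ['\'']) 0 0 with
         | some dot => (pvUnquoteName (PySem.Str.slice (PySem.Str.strip ref) none (some (dot : Int))),
                        pvUnquoteName (PySem.Str.slice (PySem.Str.strip ref) (some ((dot : Int) + 1)) none))
         | none => ("", pvUnquoteName (PySem.Str.strip ref)))
  rw [pvSplitOn_eq, h]
  cases hw : pvWalkB ((pvSplit1 (PySem.Str.strip ref).toList).1 :: (pvSplit1 (PySem.Str.strip ref).toList).2) 0 0 with
  | none => norm_num [pvToInt]
  | some n =>
    rw [show pvToInt (some n) = (n : Int) from rfl, if_neg (by omega : ¬ ((n : Int) < 0))]
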